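-- pv_equiv track=rewrite | github.com/patrykso/numerical-methods-projects | main.py | matrix_fill
-- ===== SOURCE A (Python) =====
-- def matrix_fill(matrix, a1):
--     for i in range(len(matrix)):
--         for j in range(len(matrix)):
--             if i == j:
--                 matrix[i][j] = 5 + a1
--             elif i == j + 1 or i == j - 1 or i == j + 2 or i == j - 2:
--                 matrix[i][j] = -1
--     return matrix
-- ===== SOURCE B (Python) =====
-- def matrix_fill(matrix, a1):
--     n = len(matrix)
--     diag = 5 + a1
--     for i in range(n):
--         row = matrix[i]
--         for j in range(max(i - 2, 0), min(i + 2, n - 1) + 1):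
--             row[j] = diag if j == i else -1
--     return matrix
-- ===== Notes on version B (the rewrite author's own statement) =====
-- stated objective: faster
-- what changed: Instead of scanning all n*n cells and testing each for band membership, B computes the band bounds max(i-2,0)..min(i+2,n-1) per row and writes only the at most five band entries, an O(n) fill.
import Mathlib
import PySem

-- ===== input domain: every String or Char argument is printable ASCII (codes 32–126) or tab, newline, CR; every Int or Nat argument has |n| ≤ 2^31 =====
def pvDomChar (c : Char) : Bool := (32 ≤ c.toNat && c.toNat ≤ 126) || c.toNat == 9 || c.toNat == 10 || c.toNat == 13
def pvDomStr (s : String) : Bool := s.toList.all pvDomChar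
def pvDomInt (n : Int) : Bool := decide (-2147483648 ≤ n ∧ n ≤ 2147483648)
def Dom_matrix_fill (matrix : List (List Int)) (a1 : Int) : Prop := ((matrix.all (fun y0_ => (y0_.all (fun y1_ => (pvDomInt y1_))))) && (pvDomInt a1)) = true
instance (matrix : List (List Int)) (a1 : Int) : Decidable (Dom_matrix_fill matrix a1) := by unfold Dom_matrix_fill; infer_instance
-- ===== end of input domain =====

-- B writes only the at-most-five band entries of each row (bounds max(i-2,0)..min(i+2,n-1))
-- instead of scanning all n*n cells: O(n) instead of O(n^2).
-- Both A and B mutate `matrix` in place in Python, writing the same cells the same values.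

-- matrix[i][j] = v  (exact for indices in range; out-of-range = IndexError, excluded by Pre_)
def pvSetCell (m : List (List Int)) (i j v : Int) : List (List Int) :=
  PySem.List.pySetD m i (PySem.List.pySetD (PySem.List.pyGetD m i []) j v)

-- ===== PORT A =====
-- len(matrix) is invariant (item assignment preserves length), so it is computed once.
def matrix_fill (matrix : List (List Int)) (a1 : Int) : List (List Int) :=
  let n : Int := matrix.length
  (PySem.List.pyRange 0 n 1).foldl (fun m i =>
    (PySem.List.pyRange 0 n 1).foldl (fun m j =>
      if i = j then pvSetCell m i j (5 + a1)
      else if i = j + 1 ∨ i = j - 1 ∨ i = j + 2 ∨ i = j - 2 then pvSetCell m i j (-1)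
      else m) m) matrix

-- ===== PORT B =====
def matrix_fill_alt (matrix : List (List Int)) (a1 : Int) : List (List Int) :=
  let n : Int := matrix.length
  let diag : Int := 5 + a1
  (PySem.List.pyRange 0 n 1).foldl (fun m i =>
    (PySem.List.pyRange (max (i - 2) 0) (min (i + 2) (n - 1) + 1) 1).foldl (fun m j =>
      pvSetCell m i j (if j = i then diag else -1)) m) matrix

-- ===== PRECONDITION & SPEC =====
-- Exactly the inputs where Python A returns: every row i must be long enough to hold its
-- band entries up to column min(i+2, n-1); otherwise matrix[i][j] = … raises IndexError.
def Pre_matrix_fill (matrix : List (List Int)) (a1 : Int) : Prop :=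
  ∀ i : Nat, i < matrix.length → min (i + 2) (matrix.length - 1) < (matrix.getD i []).length
instance (matrix : List (List Int)) (a1 : Int) : Decidable (Pre_matrix_fill matrix a1) := by
  unfold Pre_matrix_fill; infer_instance
def pvWitness_matrix_fill : List (List Int) × Int := ([[0,0,0],[0,0,0],[0,0,0]], 2)

def Spec_matrix_fill (matrix : List (List Int)) (a1 : Int) (out : List (List Int)) : Prop := out = matrix_fill_alt matrix a1
instance (matrix : List (List Int)) (a1 : Int) (out : List (List Int)) : Decidable (Spec_matrix_fill matrix a1 out) := by unfold Spec_matrix_fill; infer_instance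

-- ===== CLAIM (what is proved, stated in full; the proofs are below) =====
def Claim_equal_matrix_fill : Prop := ∀ (matrix : List (List Int)) (a1 : Int), Dom_matrix_fill matrix a1 → Pre_matrix_fill matrix a1 → Spec_matrix_fill matrix a1 (matrix_fill matrix a1)

-- ===== LEMMAS AND PROOFS =====

-- a fold whose body never changes the accumulator on the list's elements is the identity
theorem pv_foldl_id {α β : Type} (f : β → α → β) (l : List α) (init : β)
    (h : ∀ acc x, x ∈ l → f acc x = acc) : l.foldl f init = init := by
  induction l generalizing init with
  | nil => rfl
  | cons a t ih =>
      simp only [List.foldl_cons]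
      rw [h init a (by simp)]
      exact ih init (fun acc x hx => h acc x (by simp [hx]))

-- A's inner scan over all columns equals B's inner write over the band of row i
theorem pv_inner_eq (n i a1 : Int) (hi0 : 0 ≤ i) (hin : i < n) (m : List (List Int)) :
    (PySem.List.pyRange 0 n 1).foldl (fun m j =>
      if i = j then pvSetCell m i j (5 + a1)
      else if i = j + 1 ∨ i = j - 1 ∨ i = j + 2 ∨ i = j - 2 then pvSetCell m i j (-1)
      else m) m
    = (PySem.List.pyRange (max (i - 2) 0) (min (i + 2) (n - 1) + 1) 1).foldl (fun m j =>
        pvSetCell m i j (if j = i then 5 + a1 else -1)) m := by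
  set lo : Int := max (i - 2) 0 with hlo
  set hi : Int := min (i + 2) (n - 1) + 1 with hhi
  have h0lo : (0:Int) ≤ lo := by omega
  have hlohi : lo ≤ hi := by omega
  have hhin : hi ≤ n := by omega
  rw [PySem.List.pyRange_one_append 0 lo n h0lo (le_trans hlohi hhin),
      PySem.List.pyRange_one_append lo hi n hlohi hhin,
      List.foldl_append, List.foldl_append]
  rw [pv_foldl_id _ (PySem.List.pyRange 0 lo 1) m (by
    intro acc x hx
    have hb := (PySem.List.mem_pyRange_one).1 hx
    have : ¬ (i = x) := by omega
    have : ¬ (i = x + 1 ∨ i = x - 1 ∨ i = x + 2 ∨ i = x - 2) := by omega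
    simp_all)]
  rw [pv_foldl_id _ (PySem.List.pyRange hi n 1) _ (by
    intro acc x hx
    have hb := (PySem.List.mem_pyRange_one).1 hx
    have : ¬ (i = x) := by omega
    have : ¬ (i = x + 1 ∨ i = x - 1 ∨ i = x + 2 ∨ i = x - 2) := by omega
    simp_all)]
  apply PySem.List.foldl_congr_mem
  intro acc x hx
  have hb := (PySem.List.mem_pyRange_one).1 hx
  by_cases hij : i = x
  · simp [hij]
  · have hband : i = x + 1 ∨ i = x - 1 ∨ i = x + 2 ∨ i = x - 2 := by omega
    have hxi : ¬ (x = i) := fun h => hij h.symm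
    simp [hij, hband, hxi]

-- ===== VERDICT (by name: the statement is the Claim_ definition above) =====
theorem matrix_fill_spec : Claim_equal_matrix_fill := by
  intro matrix a1 _ _
  unfold Spec_matrix_fill matrix_fill matrix_fill_alt
  apply PySem.List.foldl_congr_mem
  intro acc i hi
  have hb := (PySem.List.mem_pyRange_one).1 hi
  exact pv_inner_eq _ i a1 hb.1 hb.2 acc
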